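-- pv_equiv track=rewrite | github.com/cdrappi/card_utils | card_utils/games/poker/five_card_hand_rank.py | _best_straight_from_sorted_distinct_values
-- ===== SOURCE A (Python) =====
-- def _best_straight_from_sorted_distinct_values(sorted_distinct_values):
--     """
--     :param sorted_distinct_values: ([int])
--     :return: (int) best straight or 0 if none
--     """
--     if len(set(sorted_distinct_values)) != len(sorted_distinct_values):
--         raise Exception(
--             f'Input to _best_straight_from_sorted_distinct_values '
--             f'must be a sorted list of distinct values'
--         )
--
--     if len(sorted_distinct_values) == 5:
--         max_value = max(sorted_distinct_values)
--         is_straight = (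
--             # we make a straight if there are 5 distinct values
--             len(sorted_distinct_values) == 5 and
--             # and the top value minus the bottom value is equal to 4
--             max_value - min(sorted_distinct_values) == 4
--         )
--         return max_value if is_straight else 0
--     elif len(sorted_distinct_values) == 6:
--         return max(
--             # recursively call for ace-low straights
--             _best_straight_from_sorted_distinct_values(sorted_distinct_values[:-1]),
--             # recursively call for ace-high straights
--             _best_straight_from_sorted_distinct_values(sorted_distinct_values[1:])
--         )
--
--     # otherwise, there's no straight
--     return 0
-- ===== SOURCE B (Python) =====
-- def _best_straight_from_sorted_distinct_values(sorted_distinct_values):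
--     """
--     :param sorted_distinct_values: ([int])
--     :return: (int) best straight or 0 if none
--     """
--     if len(set(sorted_distinct_values)) != len(sorted_distinct_values):
--         raise Exception(
--             f'Input to _best_straight_from_sorted_distinct_values '
--             f'must be a sorted list of distinct values'
--         )
--     n = len(sorted_distinct_values)
--     if n != 5 and n != 6:
--         return 0
--
--     def window_value(w):
--         m = max(w)
--         return m if m - min(w) == 4 else 0
--
--     return max(
--         window_value(sorted_distinct_values[i:i + 5])
--         for i in range(n - 4)
--     )
-- ===== Notes on version B (the rewrite author's own statement) =====
-- stated objective: alternative
-- what changed: Replaced A's recursive decomposition (length-6 case recursing into the two length-5 sublists) by a flat sliding-window scan: take the max of window_value over the positional 5-windows for lengths 5 and 6, returning 0 for all other lengths.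
import Mathlib
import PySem

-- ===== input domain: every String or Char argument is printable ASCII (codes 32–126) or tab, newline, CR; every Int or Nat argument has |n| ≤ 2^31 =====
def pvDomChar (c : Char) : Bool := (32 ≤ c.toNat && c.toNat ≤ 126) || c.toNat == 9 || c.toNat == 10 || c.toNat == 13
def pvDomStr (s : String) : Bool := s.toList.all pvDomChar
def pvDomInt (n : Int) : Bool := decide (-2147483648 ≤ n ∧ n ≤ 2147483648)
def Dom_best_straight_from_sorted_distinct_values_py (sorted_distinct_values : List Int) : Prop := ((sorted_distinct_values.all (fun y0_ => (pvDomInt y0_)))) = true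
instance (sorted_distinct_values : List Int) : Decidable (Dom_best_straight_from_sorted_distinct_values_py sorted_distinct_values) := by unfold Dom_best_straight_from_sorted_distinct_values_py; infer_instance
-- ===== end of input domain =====

-- ===== PORT A =====
-- B differs from A by decomposition: a flat sliding-window scan instead of A's recursion.
-- Equivalence is proved on Pre_ (distinct elements); on duplicates the Python A raises.

-- Port of A: literal transliteration of the recursive Python (the duplicate branch,
-- where Python raises, returns 0; such inputs are excluded by Pre_).
def best_straight_from_sorted_distinct_values_py (sorted_distinct_values : List Int) : Int :=
  if (PySem.Set.ofList sorted_distinct_values).length ≠ sorted_distinct_values.length then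
    0  -- Python: raise Exception(...) — excluded by Pre_
  else if sorted_distinct_values.length = 5 then
    let max_value := (PySem.List.max? sorted_distinct_values (fun y => y)).getD 0
    if sorted_distinct_values.length = 5 ∧
        max_value - (PySem.List.min? sorted_distinct_values (fun y => y)).getD 0 = 4 then
      max_value
    else 0
  else if sorted_distinct_values.length = 6 then
    max (best_straight_from_sorted_distinct_values_py
          (PySem.List.slice sorted_distinct_values none (some (-1))))
        (best_straight_from_sorted_distinct_values_py
          (PySem.List.slice sorted_distinct_values (some 1) none))
  else 0
termination_by sorted_distinct_values.length
decreasing_by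
  · simp [PySem.List.slice_to_neg_one]
    omega
  · simp [PySem.List.slice_from_one, List.length_tail]
    omega

-- ===== PORT B =====
-- helper for B: value of one 5-card window (its max if it is a straight, else 0)
def pvWindowValue (w : List Int) : Int :=
  let m := (PySem.List.max? w (fun y => y)).getD 0
  if m - (PySem.List.min? w (fun y => y)).getD 0 = 4 then m else 0

def best_straight_from_sorted_distinct_values_py_alt (sorted_distinct_values : List Int) : Int :=
  if (PySem.Set.ofList sorted_distinct_values).length ≠ sorted_distinct_values.length then
    0  -- Python: raise Exception(...) — excluded by Pre_
  else
    let n : Int := sorted_distinct_values.length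
    if n ≠ 5 ∧ n ≠ 6 then 0
    else
      ((PySem.List.pyRange 0 (n - 4) 1).map
        (fun i => pvWindowValue (PySem.List.slice sorted_distinct_values (some i) (some (i + 5)))))
        |> (fun l => (PySem.List.max? l (fun y => y)).getD 0)

-- ===== PRECONDITION & SPEC =====
-- Pre_ excludes lists with duplicate elements, on which the Python A raises Exception.
def Pre_best_straight_from_sorted_distinct_values_py (sorted_distinct_values : List Int) : Prop :=
  sorted_distinct_values.Nodup
instance (sorted_distinct_values : List Int) : Decidable (Pre_best_straight_from_sorted_distinct_values_py sorted_distinct_values) := by unfold Pre_best_straight_from_sorted_distinct_values_py; infer_instance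

def pvWitness_best_straight_from_sorted_distinct_values_py : List Int := [2, 3, 4, 5, 6]

def Spec_best_straight_from_sorted_distinct_values_py (sorted_distinct_values : List Int) (out : Int) : Prop := out = best_straight_from_sorted_distinct_values_py_alt sorted_distinct_values
instance (sorted_distinct_values : List Int) (out : Int) : Decidable (Spec_best_straight_from_sorted_distinct_values_py sorted_distinct_values out) := by unfold Spec_best_straight_from_sorted_distinct_values_py; infer_instance

-- ===== CLAIM (what is proved, stated in full; the proofs are below) =====
def Claim_equal_best_straight_from_sorted_distinct_values_py : Prop := ∀ (sorted_distinct_values : List Int), Dom_best_straight_from_sorted_distinct_values_py sorted_distinct_values → Pre_best_straight_from_sorted_distinct_values_py sorted_distinct_values → Spec_best_straight_from_sorted_distinct_values_py sorted_distinct_values (best_straight_from_sorted_distinct_values_py sorted_distinct_values)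

-- ===== LEMMAS AND PROOFS =====

-- A on a nodup length-5 list is exactly B's window value of that list
lemma pyA_len5 (xs : List Int) (hnd : xs.Nodup) (h5 : xs.length = 5) :
    best_straight_from_sorted_distinct_values_py xs = pvWindowValue xs := by
  unfold best_straight_from_sorted_distinct_values_py
  rw [PySem.Set.ofList_eq_self_of_nodup xs hnd]
  simp [h5, pvWindowValue]

lemma slice05_take (xs : List Int) :
    PySem.List.slice xs (some (0:Int)) (some ((0:Int) + 5)) = xs.take 5 := by
  rw [show ((0:Int) + 5) = ((5:Nat) : Int) by norm_num,
    show (some (0:Int)) = some ((0:Nat) : Int) by norm_num,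
    PySem.List.slice_natCast]
  simp

lemma slice16_drop (xs : List Int) (h : xs.length ≤ 6) :
    PySem.List.slice xs (some (1:Int)) (some ((1:Int) + 5)) = xs.drop 1 := by
  rw [show ((1:Int) + 5) = ((6:Nat) : Int) by norm_num,
    show (some (1:Int)) = some ((1:Nat) : Int) by norm_num,
    PySem.List.slice_natCast]
  exact List.take_of_length_le (by simp; omega)

-- B on a nodup length-5 list is the window value of the whole list
lemma alt_len5 (xs : List Int) (hnd : xs.Nodup) (h5 : xs.length = 5) :
    best_straight_from_sorted_distinct_values_py_alt xs = pvWindowValue xs := by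
  unfold best_straight_from_sorted_distinct_values_py_alt
  rw [PySem.Set.ofList_eq_self_of_nodup xs hnd]
  simp only [h5]
  norm_num
  rw [show PySem.List.pyRange 0 1 1 = [(0 : Int)] from by decide]
  simp only [List.map_cons, List.map_nil, slice05_take,
    List.take_of_length_le (le_of_eq h5), PySem.List.max?_id_cons]
  simp

-- B on a nodup length-6 list is the max of the two window values
lemma alt_len6 (xs : List Int) (hnd : xs.Nodup) (h6 : xs.length = 6) :
    best_straight_from_sorted_distinct_values_py_alt xs =
      max (pvWindowValue (xs.take 5)) (pvWindowValue (xs.drop 1)) := by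
  unfold best_straight_from_sorted_distinct_values_py_alt
  rw [PySem.Set.ofList_eq_self_of_nodup xs hnd]
  simp only [h6]
  norm_num
  rw [show PySem.List.pyRange 0 2 1 = [(0 : Int), 1] from by decide]
  simp only [List.map_cons, List.map_nil, slice05_take, slice16_drop xs (le_of_eq h6),
    PySem.List.max?_id_cons]
  simp

-- ===== VERDICT (by name: the statement is the Claim_ definition above) =====
theorem best_straight_from_sorted_distinct_values_py_spec : Claim_equal_best_straight_from_sorted_distinct_values_py := by
  intro xs _ hnd
  unfold Spec_best_straight_from_sorted_distinct_values_py
  by_cases h5 : xs.length = 5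
  · rw [pyA_len5 xs hnd h5, alt_len5 xs hnd h5]
  · by_cases h6 : xs.length = 6
    · -- length 6: A recurses into the two length-5 sublists
      have hdl : xs.dropLast = xs.take 5 := by
        rw [List.dropLast_eq_take, h6]
      have nd1 : (xs.take 5).Nodup := (List.take_sublist 5 xs).nodup hnd
      have nd2 : (xs.drop 1).Nodup := (List.drop_sublist 1 xs).nodup hnd
      have l1 : (xs.take 5).length = 5 := by simp [h6]
      have l2 : (xs.drop 1).length = 5 := by simp [h6]
      rw [alt_len6 xs hnd h6]
      unfold best_straight_from_sorted_distinct_values_py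
      rw [PySem.Set.ofList_eq_self_of_nodup xs hnd]
      simp only [h6, if_false, if_true, ne_eq, not_true_eq_false,
        PySem.List.slice_to_neg_one, PySem.List.slice_from_one]
      rw [hdl, pyA_len5 _ nd1 l1, pyA_len5 (xs.tail) (by rw [← List.drop_one]; exact nd2)
          (by rw [← List.drop_one]; exact l2), List.drop_one]
      norm_num
    · -- other lengths: both return 0
      unfold best_straight_from_sorted_distinct_values_py
        best_straight_from_sorted_distinct_values_py_alt
      rw [PySem.Set.ofList_eq_self_of_nodup xs hnd]
      have hi5 : (xs.length : Int) ≠ 5 := by omega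
      have hi6 : (xs.length : Int) ≠ 6 := by omega
      simp [h5, h6, hi5, hi6]
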